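-- pv_equiv track=rewrite | github.com/vibimvab/Problems | Programmers/level1/폰켓몬.py | solution
-- ===== SOURCE A (Python) =====
-- def solution(nums):
--     counted = set()
--     count = 0
--     for num in nums:
--         if num not in counted:
--             counted.add(num)
--             count += 1
--
--     return min(count, len(nums) // 2)
-- ===== SOURCE B (Python) =====
-- def solution(nums):
--     s = sorted(nums)
--     if not s:
--         distinct = 0
--     else:
--         distinct = 1 + sum(1 for a, b in zip(s, s[1:]) if a != b)
--     return min(distinct, len(nums) // 2)
-- ===== Notes on version B (the rewrite author's own statement) =====
-- stated objective: alternative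
-- what changed: Replaces the hash-set membership pass with sorting the list and counting positions where an element differs from its predecessor (distinct = 1 + adjacent changes), then capping at len//2.
import Mathlib
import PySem

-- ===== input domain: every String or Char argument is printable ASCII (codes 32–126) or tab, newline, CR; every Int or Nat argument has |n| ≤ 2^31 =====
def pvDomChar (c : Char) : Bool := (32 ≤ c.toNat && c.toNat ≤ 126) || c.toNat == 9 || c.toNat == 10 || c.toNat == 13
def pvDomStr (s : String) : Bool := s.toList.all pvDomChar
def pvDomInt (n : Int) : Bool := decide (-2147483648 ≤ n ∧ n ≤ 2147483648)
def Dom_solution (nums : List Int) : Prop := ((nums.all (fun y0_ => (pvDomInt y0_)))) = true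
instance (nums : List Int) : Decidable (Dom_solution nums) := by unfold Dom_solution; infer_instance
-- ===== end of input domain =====

-- B replaces A's hash-set membership pass by sorting and counting adjacent changes (alternative algorithm, similar cost).


-- ===== PORT A =====
def solution (nums : List Int) : Int :=
  let st := nums.foldl
    (fun (p : PySem.Set Int × Int) num =>
      if ¬ PySem.Set.contains p.1 num then (PySem.Set.add p.1 num, p.2 + 1) else p)
    (PySem.Set.empty, 0)
  min st.2 (PySem.Int.floordiv (nums.length : Int) 2)

-- ===== PORT B =====
-- 'distinct' of Source B: 0 for the empty sorted list, else 1 + the number of adjacent unequal pairs (the zip sum)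
def pvAdjDistinct (s : List Int) : Int :=
  match s with
  | [] => 0
  | _ :: t => 1 + ((s.zip t).countP (fun p => p.1 != p.2) : Int)

def solution_alt (nums : List Int) : Int :=
  let s := PySem.List.sorted nums (fun x => x) false
  let distinct : Int := pvAdjDistinct s
  min distinct (PySem.Int.floordiv (nums.length : Int) 2)

-- ===== PRECONDITION & SPEC =====
def Spec_solution (nums : List Int) (out : Int) : Prop := out = solution_alt nums
instance (nums : List Int) (out : Int) : Decidable (Spec_solution nums out) := by unfold Spec_solution; infer_instance

-- ===== CLAIM (what is proved, stated in full; the proofs are below) =====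
def Claim_equal_solution : Prop := ∀ (nums : List Int), Dom_solution nums → Spec_solution nums (solution nums)

-- ===== LEMMAS AND PROOFS =====

-- A's loop count: the count equals the growth of the set's underlying list.
theorem loopA_count (nums : List Int) : ∀ (s : PySem.Set Int) (c : Int),
    (nums.foldl
      (fun (p : PySem.Set Int × Int) num =>
        if ¬ PySem.Set.contains p.1 num then (PySem.Set.add p.1 num, p.2 + 1) else p)
      (s, c)).2
    = c + ((nums.foldl PySem.Set.add s).length : Int) - (s.length : Int) := by
  induction nums with
  | nil => intro s c; simp
  | cons x t ih =>
    intro s c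
    by_cases h : PySem.Set.contains s x
    · have hadd : PySem.Set.add s x = s := by
        simp [PySem.Set.add]
        simpa using h
      simp only [List.foldl_cons]
      rw [if_neg (not_not_intro h), hadd]
      exact ih s c
    · have hadd : PySem.Set.add s x = s ++ [x] := by
        simp [PySem.Set.add]
        intro hmem
        exact absurd (by simpa using hmem) h
      simp only [List.foldl_cons]
      rw [if_pos h]
      rw [ih (PySem.Set.add s x) (c + 1)]
      rw [hadd]
      simp
      omega

-- distinct count via Set.ofList equals the Finset cardinality
theorem ofList_length_eq_card (xs : List Int) :
    ((PySem.Set.ofList xs).length : Int) = (xs.toFinset.card : Int) := by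
  have h1 : (PySem.Set.ofList xs).toFinset = xs.toFinset := by
    ext a; simp [List.mem_toFinset, PySem.Set.mem_ofList]
  have h2 : (PySem.Set.ofList xs).toFinset.card = (PySem.Set.ofList xs).length :=
    List.toFinset_card_of_nodup (PySem.Set.nodup_ofList xs)
  rw [← h1, h2]

-- B's adjacent-change count on a (≤)-sorted list computes the Finset cardinality.
theorem adj_count (s : List Int) (hs : s.Pairwise (· ≤ ·)) :
    pvAdjDistinct s = (s.toFinset.card : Int) := by
  induction s with
  | nil => simp [pvAdjDistinct]
  | cons a t ih =>
    match t, hs with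
    | [], _ => simp [pvAdjDistinct]
    | b :: u, hs =>
      have hpa := (List.pairwise_cons.mp hs).1
      have hpt := (List.pairwise_cons.mp hs).2
      have hab : a ≤ b := hpa b (by simp)
      have ih' := ih hpt
      simp only [pvAdjDistinct, List.zip, List.zipWith_cons_cons, List.countP_cons] at ih' ⊢
      by_cases hne : a = b
      · subst hne
        simp only [bne_self_eq_false, Bool.false_eq_true, if_false,
          List.toFinset_cons, Finset.insert_idem]
        simp only [List.toFinset_cons] at ih'
        omega
      · have hnotmem : a ∉ b :: u := by
          intro hmem
          rcases List.mem_cons.mp hmem with h | h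
          · exact hne h
          · have hbx := (List.pairwise_cons.mp hpt).1 a h
            exact hne (le_antisymm hab hbx)
        have hcard : (a :: b :: u).toFinset.card = (b :: u).toFinset.card + 1 := by
          simp only [List.toFinset_cons (a := a)]
          rw [Finset.card_insert_of_notMem (by simpa using hnotmem)]
        have hbne : ((a != b) = true) := by simpa using hne
        simp only [hbne, if_true]
        omega

-- ===== VERDICT (by name: the statement is the Claim_ definition above) =====
theorem solution_spec : Claim_equal_solution := by
  intro nums _
  unfold Spec_solution solution solution_alt
  have hA := loopA_count nums PySem.Set.empty 0
  have hofl : PySem.Set.ofList nums = nums.foldl PySem.Set.add PySem.Set.empty := by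
    rfl
  have hAcount : (nums.foldl
      (fun (p : PySem.Set Int × Int) num =>
        if ¬ PySem.Set.contains p.1 num then (PySem.Set.add p.1 num, p.2 + 1) else p)
      (PySem.Set.empty, 0)).2 = (nums.toFinset.card : Int) := by
    rw [hA]
    have := ofList_length_eq_card nums
    rw [hofl] at this
    simp [PySem.Set.empty] at this ⊢
    omega
  have hsorted := PySem.List.sorted_pairwise (xs := nums) (key := fun x => x)
  have hB := adj_count (PySem.List.sorted nums (fun x => x) false) hsorted
  have hperm : (PySem.List.sorted nums (fun x => x) false).toFinset = nums.toFinset := by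
    ext a
    simp [List.mem_toFinset, PySem.List.mem_sorted]
  rw [hperm] at hB
  simp only []
  rw [hAcount, hB]
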